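-- pv_equiv track=rewrite | github.com/jankneumann/agentic-coding-tools | scripts/parallel_zones.py | compute_impact_radius
-- ===== SOURCE A (Python) =====
-- from collections import defaultdict, deque
--
-- def compute_impact_radius(
--     module_id: str,
--     dependents_graph: dict[str, set[str]],
-- ) -> list[str]:
--     """BFS over the dependents graph to find all transitive dependents.
--
--     Returns sorted list of module IDs that would be impacted if *module_id*
--     is modified (i.e., everything that transitively depends on it).
--     """
--     visited: set[str] = set()
--     queue: deque[str] = deque([module_id])
--     while queue:
--         current = queue.popleft()
--         for dep in dependents_graph.get(current, ()):
--             if dep not in visited: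
--                 visited.add(dep)
--                 queue.append(dep)
--     return sorted(visited)
-- ===== SOURCE B (Python) =====
-- def compute_impact_radius(
--     module_id: str,
--     dependents_graph: dict[str, set[str]],
-- ) -> list[str]:
--     """Level-synchronous frontier expansion instead of a node-at-a-time queue:
--     repeatedly replace the frontier by the set of not-yet-visited dependents of
--     the whole frontier until it is empty, then sort the accumulated set."""
--     visited: set[str] = set()
--     frontier: set[str] = {module_id}
--     while frontier:
--         frontier = {
--             d
--             for x in frontier
--             for d in dependents_graph.get(x, ())
--             if d not in visited
--         }
--         visited |= frontier
--     return sorted(visited)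
-- ===== Notes on version B (the rewrite author's own statement) =====
-- stated objective: alternative
-- what changed: A's node-at-a-time BFS with a FIFO queue is replaced by level-synchronous frontier expansion: each round a set comprehension computes all not-yet-visited dependents of the whole current frontier at once, unions them into visited, and makes them the next frontier.
import Mathlib
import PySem

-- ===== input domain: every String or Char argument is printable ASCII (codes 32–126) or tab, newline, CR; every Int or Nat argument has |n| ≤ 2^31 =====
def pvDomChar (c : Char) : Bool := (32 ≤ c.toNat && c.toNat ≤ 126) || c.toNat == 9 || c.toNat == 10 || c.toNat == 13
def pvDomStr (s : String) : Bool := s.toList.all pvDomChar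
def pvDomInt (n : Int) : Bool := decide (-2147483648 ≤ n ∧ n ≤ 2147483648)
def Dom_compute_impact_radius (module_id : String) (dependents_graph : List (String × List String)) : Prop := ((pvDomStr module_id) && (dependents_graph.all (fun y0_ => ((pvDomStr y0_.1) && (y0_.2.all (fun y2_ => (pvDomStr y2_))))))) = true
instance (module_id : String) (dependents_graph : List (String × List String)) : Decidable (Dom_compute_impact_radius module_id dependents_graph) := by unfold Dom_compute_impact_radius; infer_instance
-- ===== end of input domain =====

-- B replaces A's node-at-a-time BFS queue by level-synchronous frontier expansion
-- (whole-frontier set rounds); same return value, similar cost (objective: alternative).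

-- ===== PORT A =====
-- dependents_graph.get(x, ()) : the neighbour list of x (shared transliteration of the same Python expression)
def pvNbrs (g : List (String × List String)) (x : String) : List String :=
  ((g.find? (fun p => p.1 == x)).map Prod.snd).getD []

-- everything that can ever be added to visited (termination measure only, not part of the computation)
def pvAllV (g : List (String × List String)) : List String := g.flatMap (fun p => p.2)

def pvMu (g : List (String × List String)) (v : List String) : Nat :=
  ((pvAllV g).dedup.filter (fun x => decide (x ∉ v))).length

lemma pv_mem_allV {g : List (String × List String)} {x d : String}
    (hd : d ∈ pvNbrs g x) : d ∈ pvAllV g := by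
  unfold pvNbrs at hd
  cases h : g.find? (fun p => p.1 == x) with
  | none => rw [h] at hd; simp at hd
  | some p =>
    rw [h] at hd
    simp only [Option.map_some, Option.getD_some] at hd
    exact List.mem_flatMap.mpr ⟨p, List.mem_of_find?_eq_some h, hd⟩

lemma pv_filter_count (L : List String) (v s : List String) (hL : L.Nodup) (hs : s.Nodup)
    (h : ∀ x ∈ s, x ∈ L ∧ x ∉ v) :
    (L.filter (fun x => decide (x ∉ v ++ s))).length + s.length
      ≤ (L.filter (fun x => decide (x ∉ v))).length := by
  induction s generalizing v with
  | nil => simp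
  | cons d ds ih =>
    have hd := h d (List.mem_cons_self)
    have h1 : (L.filter (fun x => decide (x ∉ v ++ d :: ds)))
        = (L.filter (fun x => decide (x ∉ (v ++ [d]) ++ ds))) := by
      rw [List.append_assoc]; rfl
    have ih' := ih (v ++ [d]) hs.of_cons (fun x hx => by
      refine ⟨(h x (List.mem_cons_of_mem _ hx)).1, ?_⟩
      have hxv := (h x (List.mem_cons_of_mem _ hx)).2
      have hxd : x ≠ d := fun he => (List.nodup_cons.mp hs).1 (he ▸ hx)
      simp [List.mem_append, hxv, hxd])
    have h2 : (L.filter (fun x => decide (x ∉ v ++ [d])))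
        = (L.filter (fun x => decide (x ∉ v))).filter (fun x => decide (¬ x = d)) := by
      rw [List.filter_filter]
      apply List.filter_congr
      intro x _
      by_cases hxe : x = d <;> simp [hxe, List.mem_append]
    have hM : d ∈ L.filter (fun x => decide (x ∉ v)) := by
      simp [List.mem_filter, hd.1, hd.2]
    have hMn : (L.filter (fun x => decide (x ∉ v))).Nodup := hL.filter _
    have h3 : ((L.filter (fun x => decide (x ∉ v))).filter (fun x => decide (¬ x = d))).length + 1
        = (L.filter (fun x => decide (x ∉ v))).length := by
      have he : (L.filter (fun x => decide (x ∉ v))).erase d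
          = (L.filter (fun x => decide (x ∉ v))).filter (fun x => decide (¬ x = d)) := by
        rw [hMn.erase_eq_filter]
        apply List.filter_congr
        intro x _
        by_cases hxe : x = d <;> simp [hxe]
      have hl := List.length_erase_of_mem hM
      have hel := congrArg List.length he
      have hpos : 0 < (L.filter (fun x => decide (x ∉ v))).length := List.length_pos_of_mem hM
      omega
    have h2l := congrArg List.length h2
    rw [h1]
    simp only [List.length_cons]
    omega

-- one body of A's inner for-loop: if dep not in visited: visited.add(dep); queue.append(dep)
def pvStep (st : List String × List String) (dep : String) : List String × List String :=
  if dep ∈ st.1 then st else (st.1 ++ [dep], st.2 ++ [dep])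

lemma pv_foldl_step (deps : List String) (v q : List String) :
    ∃ news : List String,
      deps.foldl pvStep (v, q) = (v ++ news, q ++ news) ∧ news.Nodup ∧
      (∀ x ∈ news, x ∈ deps ∧ x ∉ v) ∧ (∀ d ∈ deps, d ∈ v ++ news) := by
  induction deps generalizing v q with
  | nil => exact ⟨[], by simp, List.nodup_nil, by simp, by simp⟩
  | cons d ds ih =>
    by_cases hd : d ∈ v
    · obtain ⟨news, h1, h2, h3, h4⟩ := ih v q
      refine ⟨news, ?_, h2, ?_, ?_⟩
      · simpa [List.foldl_cons, pvStep, hd] using h1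
      · exact fun x hx => ⟨List.mem_cons_of_mem _ (h3 x hx).1, (h3 x hx).2⟩
      · intro e he
        rcases List.mem_cons.mp he with rfl | he'
        · exact List.mem_append.mpr (Or.inl hd)
        · exact h4 e he'
    · obtain ⟨news, h1, h2, h3, h4⟩ := ih (v ++ [d]) (q ++ [d])
      have hdn : d ∉ news := fun hx => by
        have := (h3 d hx).2
        simp [List.mem_append] at this
      refine ⟨d :: news, ?_, List.nodup_cons.mpr ⟨hdn, h2⟩, ?_, ?_⟩
      · have : (d :: ds).foldl pvStep (v, q) = ds.foldl pvStep (v ++ [d], q ++ [d]) := by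
          simp [List.foldl_cons, pvStep, hd]
        rw [this, h1, List.append_assoc, List.append_assoc]
        rfl
      · intro x hx
        rcases List.mem_cons.mp hx with rfl | hx'
        · exact ⟨List.mem_cons_self, hd⟩
        · refine ⟨List.mem_cons_of_mem _ (h3 x hx').1, fun hv => (h3 x hx').2 ?_⟩
          exact List.mem_append.mpr (Or.inl hv)
      · intro e he
        rcases List.mem_cons.mp he with rfl | he'
        · simp
        · have := h4 e he'
          simpa [List.mem_append, List.mem_cons, or_assoc] using this
  
lemma pv_bfs_dec (g : List (String × List String)) (current : String)
    (v rest news : List String) (h2 : news.Nodup)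
    (h3 : ∀ x ∈ news, x ∈ pvNbrs g current ∧ x ∉ v) :
    pvMu g (v ++ news) + (rest ++ news).length < pvMu g v + (current :: rest).length := by
  have hle := pv_filter_count (pvAllV g).dedup v news (List.nodup_dedup _) h2
    (fun x hx => ⟨List.mem_dedup.mpr (pv_mem_allV (h3 x hx).1), (h3 x hx).2⟩)
  simp only [pvMu] at *
  simp only [List.length_append, List.length_cons]
  omega

-- A's while-loop over the queue
def bfsA : List (String × List String) → List String → List String → List String
  | _, visited, [] => visited
  | g, visited, current :: rest =>
    bfsA g ((pvNbrs g current).foldl pvStep (visited, rest)).1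
          ((pvNbrs g current).foldl pvStep (visited, rest)).2
termination_by g visited queue => pvMu g visited + queue.length
decreasing_by
  obtain ⟨news, h1, h2, h3, _⟩ := pv_foldl_step (pvNbrs g current) visited rest
  rw [h1]
  exact pv_bfs_dec g current visited rest news h2 h3

def compute_impact_radius (module_id : String) (dependents_graph : List (String × List String)) : List String :=
  PySem.List.sorted (bfsA dependents_graph [] [module_id]) (fun x => x)

-- ===== PORT B =====
-- {d for x in frontier for d in dependents_graph.get(x, ()) if d not in visited}
def pvNext (g : List (String × List String)) (visited frontier : List String) : List String :=
  PySem.Set.ofList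
    ((frontier.flatMap (fun x => pvNbrs g x)).filter (fun d => decide (d ∉ visited)))

lemma pvNext_sub (g : List (String × List String)) (visited frontier : List String) :
    ∀ x ∈ pvNext g visited frontier, (∃ y ∈ frontier, x ∈ pvNbrs g y) ∧ x ∉ visited := by
  intro x hx
  unfold pvNext at hx
  rw [PySem.Set.mem_ofList] at hx
  rcases List.mem_filter.mp hx with ⟨hfm, hnv⟩
  exact ⟨List.mem_flatMap.mp hfm, by simpa using hnv⟩

lemma pv_union_eq_append (v s : List String) (hs : s.Nodup) (h : ∀ x ∈ s, x ∉ v) :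
    PySem.Set.union v s = v ++ s := by
  induction s generalizing v with
  | nil => simp [PySem.Set.union, PySem.Set.update]
  | cons d ds ih =>
    have hdv : d ∉ v := h d List.mem_cons_self
    have hd : PySem.Set.add v d = v ++ [d] := by
      simp [PySem.Set.add, List.contains_eq_mem, hdv]
    have step : PySem.Set.union v (d :: ds) = PySem.Set.union (v ++ [d]) ds := by
      simp [PySem.Set.union, PySem.Set.update, List.foldl_cons, hd]
    rw [step, ih (v ++ [d]) hs.of_cons (fun x hx => by
      have hxv := h x (List.mem_cons_of_mem _ hx)
      have hxd : x ≠ d := fun he => (List.nodup_cons.mp hs).1 (he ▸ hx)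
      simp [List.mem_append, hxv, hxd]), List.append_assoc]
    rfl

lemma pv_rounds_dec (g : List (String × List String)) (v f : List String) (hf : ¬ f.isEmpty) :
    pvMu g (v ++ pvNext g v f) + (pvNext g v f).length < pvMu g v + f.length := by
  have hnd : (pvNext g v f).Nodup := PySem.Set.nodup_ofList _
  have hle := pv_filter_count (pvAllV g).dedup v (pvNext g v f) (List.nodup_dedup _) hnd
    (fun x hx => by
      obtain ⟨⟨y, _, hy⟩, hnv⟩ := pvNext_sub g v f x hx
      exact ⟨List.mem_dedup.mpr (pv_mem_allV hy), hnv⟩)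
  have hfl : 0 < f.length := by
    cases f with
    | nil => simp at hf
    | cons a t => simp
  simp only [pvMu] at *
  omega

-- B's while-loop: one round replaces the whole frontier
def roundsB (g : List (String × List String)) (visited frontier : List String) : List String :=
  if hne : frontier.isEmpty then visited
  else roundsB g (PySem.Set.union visited (pvNext g visited frontier)) (pvNext g visited frontier)
termination_by pvMu g visited + frontier.length
decreasing_by
  rw [pv_union_eq_append visited (pvNext g visited frontier) (PySem.Set.nodup_ofList _)
    (fun x hx => (pvNext_sub g visited frontier x hx).2)]
  exact pv_rounds_dec g visited frontier hne

def compute_impact_radius_alt (module_id : String) (dependents_graph : List (String × List String)) : List String :=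
  PySem.List.sorted (roundsB dependents_graph [] [module_id]) (fun x => x)

-- ===== PRECONDITION & SPEC =====
def Spec_compute_impact_radius (module_id : String) (dependents_graph : List (String × List String)) (out : List String) : Prop := out = compute_impact_radius_alt module_id dependents_graph
instance (module_id : String) (dependents_graph : List (String × List String)) (out : List String) : Decidable (Spec_compute_impact_radius module_id dependents_graph out) := by unfold Spec_compute_impact_radius; infer_instance

-- ===== CLAIM (what is proved, stated in full; the proofs are below) =====
def Claim_equal_compute_impact_radius : Prop := ∀ (module_id : String) (dependents_graph : List (String × List String)), Dom_compute_impact_radius module_id dependents_graph → Spec_compute_impact_radius module_id dependents_graph (compute_impact_radius module_id dependents_graph)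

-- ===== LEMMAS AND PROOFS =====

-- nodes reachable from src by a nonempty path in the dependents graph
inductive pvReach (g : List (String × List String)) (src : String) : String → Prop
  | head : ∀ d, d ∈ pvNbrs g src → pvReach g src d
  | step : ∀ x d, pvReach g src x → d ∈ pvNbrs g x → pvReach g src d

lemma pv_closed_char (g : List (String × List String)) (src : String) (v : List String)
    (hv : ∀ x ∈ v, pvReach g src x)
    (hcl : ∀ x, (x = src ∨ x ∈ v) → ∀ d ∈ pvNbrs g x, d ∈ v) :
    ∀ x, x ∈ v ↔ pvReach g src x := by
  intro x
  constructor
  · exact hv x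
  · intro hr
    induction hr with
    | head d hd => exact hcl src (Or.inl rfl) d hd
    | step y d _ hd ih => exact hcl y (Or.inr ih) d hd

lemma bfsA_char (g : List (String × List String)) (src : String) :
    ∀ (v q : List String), v.Nodup → (∀ x ∈ v, pvReach g src x) →
      (∀ x ∈ q, x = src ∨ x ∈ v) →
      (∀ x, (x = src ∨ x ∈ v) → x ∉ q → ∀ d ∈ pvNbrs g x, d ∈ v) →
      (bfsA g v q).Nodup ∧ ∀ x, x ∈ bfsA g v q ↔ pvReach g src x := by
  suffices H : ∀ n v q, pvMu g v + q.length ≤ n → v.Nodup → (∀ x ∈ v, pvReach g src x) →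
      (∀ x ∈ q, x = src ∨ x ∈ v) →
      (∀ x, (x = src ∨ x ∈ v) → x ∉ q → ∀ d ∈ pvNbrs g x, d ∈ v) →
      (bfsA g v q).Nodup ∧ ∀ x, x ∈ bfsA g v q ↔ pvReach g src x by
    exact fun v q => H (pvMu g v + q.length) v q le_rfl
  intro n
  induction n with
  | zero =>
    intro v q hle hnd hv hq hcl
    have hq0 : q = [] := by
      cases q with
      | nil => rfl
      | cons a t => exfalso; simp only [List.length_cons] at hle; omega
    subst hq0
    rw [bfsA]
    exact ⟨hnd, pv_closed_char g src v hv (fun x hx => hcl x hx (List.not_mem_nil))⟩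
  | succ n ih =>
    intro v q hle hnd hv hq hcl
    cases q with
    | nil =>
      rw [bfsA]
      exact ⟨hnd, pv_closed_char g src v hv (fun x hx => hcl x hx (List.not_mem_nil))⟩
    | cons current rest =>
      obtain ⟨news, h1, h2, h3, h4⟩ := pv_foldl_step (pvNbrs g current) v rest
      have hdec := pv_bfs_dec g current v rest news h2 h3
      have hcur : current = src ∨ pvReach g src current := by
        rcases hq current List.mem_cons_self with h | h
        · exact Or.inl h
        · exact Or.inr (hv current h)
      have hvnd' : (v ++ news).Nodup :=
        hnd.append h2 (by intro a ha hb; exact (h3 a hb).2 ha)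
      have hv' : ∀ x ∈ v ++ news, pvReach g src x := by
        intro x hx
        rcases List.mem_append.mp hx with hx | hx
        · exact hv x hx
        · rcases hcur with rfl | hr
          · exact pvReach.head x (h3 x hx).1
          · exact pvReach.step current x hr (h3 x hx).1
      have hq' : ∀ x ∈ rest ++ news, x = src ∨ x ∈ v ++ news := by
        intro x hx
        rcases List.mem_append.mp hx with hx | hx
        · rcases hq x (List.mem_cons_of_mem _ hx) with h | h
          · exact Or.inl h
          · exact Or.inr (List.mem_append.mpr (Or.inl h))
        · exact Or.inr (List.mem_append.mpr (Or.inr hx))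
      have hcl' : ∀ x, (x = src ∨ x ∈ v ++ news) → x ∉ rest ++ news →
          ∀ d ∈ pvNbrs g x, d ∈ v ++ news := by
        intro x hx hnq d hd
        by_cases hxc : x = current
        · exact h4 d (hxc ▸ hd)
        · have hx' : x = src ∨ x ∈ v := by
            rcases hx with h | h
            · exact Or.inl h
            · rcases List.mem_append.mp h with h | h
              · exact Or.inr h
              · exact absurd (List.mem_append.mpr (Or.inr h)) hnq
          have hxq : x ∉ current :: rest := by
            intro hxm
            rcases List.mem_cons.mp hxm with rfl | hxm
            · exact hxc rfl
            · exact hnq (List.mem_append.mpr (Or.inl hxm))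
          exact List.mem_append.mpr (Or.inl (hcl x hx' hxq d hd))
      have hres := ih (v ++ news) (rest ++ news) (by omega) hvnd' hv' hq' hcl'
      rw [bfsA, h1]
      exact hres

lemma roundsB_char (g : List (String × List String)) (src : String) :
    ∀ (v f : List String), v.Nodup → (∀ x ∈ v, pvReach g src x) →
      (∀ x ∈ f, x = src ∨ x ∈ v) →
      (∀ x, (x = src ∨ x ∈ v) → x ∉ f → ∀ d ∈ pvNbrs g x, d ∈ v) →
      (roundsB g v f).Nodup ∧ ∀ x, x ∈ roundsB g v f ↔ pvReach g src x := by
  suffices H : ∀ n v f, pvMu g v + f.length ≤ n → v.Nodup → (∀ x ∈ v, pvReach g src x) →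
      (∀ x ∈ f, x = src ∨ x ∈ v) →
      (∀ x, (x = src ∨ x ∈ v) → x ∉ f → ∀ d ∈ pvNbrs g x, d ∈ v) →
      (roundsB g v f).Nodup ∧ ∀ x, x ∈ roundsB g v f ↔ pvReach g src x by
    exact fun v f => H (pvMu g v + f.length) v f le_rfl
  intro n
  induction n with
  | zero =>
    intro v f hle hnd hv hf hcl
    have hf0 : f = [] := by
      cases f with
      | nil => rfl
      | cons a t => exfalso; simp only [List.length_cons] at hle; omega
    subst hf0
    rw [roundsB]
    simp only [List.isEmpty_nil, dite_true]
    exact ⟨hnd, pv_closed_char g src v hv (fun x hx => hcl x hx (List.not_mem_nil))⟩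
  | succ n ih =>
    intro v f hle hnd hv hf hcl
    by_cases hfe : f.isEmpty
    · have hf0 : f = [] := List.isEmpty_iff.mp hfe
      subst hf0
      rw [roundsB]
      simp only [List.isEmpty_nil, dite_true]
      exact ⟨hnd, pv_closed_char g src v hv (fun x hx => hcl x hx (List.not_mem_nil))⟩
    · have hnext := pvNext_sub g v f
      have hnnd : (pvNext g v f).Nodup := PySem.Set.nodup_ofList _
      have huni : PySem.Set.union v (pvNext g v f) = v ++ pvNext g v f :=
        pv_union_eq_append v (pvNext g v f) hnnd (fun x hx => (hnext x hx).2)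
      have hdec := pv_rounds_dec g v f hfe
      have hvnd' : (v ++ pvNext g v f).Nodup :=
        hnd.append hnnd (by intro a ha hb; exact (hnext a hb).2 ha)
      have hv' : ∀ x ∈ v ++ pvNext g v f, pvReach g src x := by
        intro x hx
        rcases List.mem_append.mp hx with hx | hx
        · exact hv x hx
        · obtain ⟨⟨y, hy, hxy⟩, _⟩ := hnext x hx
          rcases hf y hy with rfl | hyv
          · exact pvReach.head x hxy
          · exact pvReach.step y x (hv y hyv) hxy
      have hf' : ∀ x ∈ pvNext g v f, x = src ∨ x ∈ v ++ pvNext g v f :=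
        fun x hx => Or.inr (List.mem_append.mpr (Or.inr hx))
      have hcl' : ∀ x, (x = src ∨ x ∈ v ++ pvNext g v f) → x ∉ pvNext g v f →
          ∀ d ∈ pvNbrs g x, d ∈ v ++ pvNext g v f := by
        intro x hx hnf d hd
        by_cases hxf : x ∈ f
        · by_cases hdv : d ∈ v
          · exact List.mem_append.mpr (Or.inl hdv)
          · refine List.mem_append.mpr (Or.inr ?_)
            unfold pvNext
            rw [PySem.Set.mem_ofList]
            exact List.mem_filter.mpr ⟨List.mem_flatMap.mpr ⟨x, hxf, hd⟩, by simpa using hdv⟩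
        · have hx' : x = src ∨ x ∈ v := by
            rcases hx with h | h
            · exact Or.inl h
            · rcases List.mem_append.mp h with h | h
              · exact Or.inr h
              · exact absurd h hnf
          exact List.mem_append.mpr (Or.inl (hcl x hx' hxf d hd))
      have hres := ih (v ++ pvNext g v f) (pvNext g v f)
        (by omega) hvnd' hv' hf' hcl'
      rw [roundsB]
      simp only [hfe]
      rw [huni]
      exact hres

-- ===== VERDICT (by name: the statement is the Claim_ definition above) =====
theorem compute_impact_radius_spec : Claim_equal_compute_impact_radius := by
  intro m g _
  show compute_impact_radius m g = compute_impact_radius_alt m g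
  unfold compute_impact_radius compute_impact_radius_alt
  have hinit : ∀ x, (x = m ∨ x ∈ ([] : List String)) → x ∉ [m] → ∀ d ∈ pvNbrs g x, d ∈ ([] : List String) := by
    intro x hx hnx d _
    rcases hx with rfl | h
    · exact absurd List.mem_cons_self hnx
    · exact absurd h (List.not_mem_nil)
  have hA := bfsA_char g m [] [m] List.nodup_nil (by simp)
    (fun x hx => Or.inl (by simpa using hx)) hinit
  have hB := roundsB_char g m [] [m] List.nodup_nil (by simp)
    (fun x hx => Or.inl (by simpa using hx)) hinit
  apply PySem.List.sorted_eq_sorted_of_perm _ _ _ (fun a b h => h)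
  rw [List.perm_ext_iff_of_nodup hA.1 hB.1]
  intro a
  rw [(hA.2 a), (hB.2 a)]
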